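-- pv_equiv track=rewrite | github.com/angele-d/AOC | 2024/2024_day09part2.py | existTrou
-- ===== SOURCE A (Python) =====
-- def existTrou(filesystem,tailleMinTrou,maxIndice):
--     for i in range (maxIndice):
--         if filesystem[i] == ".":
--             j = 0
--             while i+j < len(filesystem) and filesystem[i+j] == ".":
--                 if tailleMinTrou <= j+1: return i
--                 else: j += 1
--     return -1
-- ===== SOURCE B (Python) =====
-- def existTrou(filesystem, tailleMinTrou, maxIndice):
--     need = max(tailleMinTrou, 1)
--     start = None
--     for i, s in enumerate(filesystem):
--         if s == ".":
--             if start is None: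
--                 start = i
--             if start < maxIndice and i - start + 1 >= need:
--                 return start
--         else:
--             start = None
--     return -1
-- ===== Notes on version B (the rewrite author's own statement) =====
-- stated objective: alternative
-- what changed: B replaces A's rescan-from-every-dot-index nested loops by a single pass that tracks the start of the current dot run and returns that start as soon as the run reaches the required length.
-- outside the precondition, e.g. on existTrou(['.'], 1, 3): A returns 0, B returns 0
import Mathlib
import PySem

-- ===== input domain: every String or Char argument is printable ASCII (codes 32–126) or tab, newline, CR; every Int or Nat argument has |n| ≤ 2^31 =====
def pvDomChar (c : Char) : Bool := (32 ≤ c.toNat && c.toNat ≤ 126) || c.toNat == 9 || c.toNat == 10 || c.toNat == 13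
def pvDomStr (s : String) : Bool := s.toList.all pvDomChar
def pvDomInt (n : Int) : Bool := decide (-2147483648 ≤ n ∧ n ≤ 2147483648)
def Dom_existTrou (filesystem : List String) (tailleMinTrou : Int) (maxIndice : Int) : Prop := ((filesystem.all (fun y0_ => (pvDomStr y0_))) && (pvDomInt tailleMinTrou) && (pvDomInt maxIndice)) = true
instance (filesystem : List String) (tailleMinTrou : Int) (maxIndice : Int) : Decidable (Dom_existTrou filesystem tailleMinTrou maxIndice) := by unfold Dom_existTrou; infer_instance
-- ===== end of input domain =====

-- ===== PORT A =====
-- B replaces A's nested rescans by a single pass that tracks the current dot-run start.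
-- inner 'while i+j < len(filesystem) and filesystem[i+j] == ".": ...' of A
def existTrouWhile (fs : List String) (t : Int) (i j : Nat) : Bool :=
  if h : i + j < fs.length then
    if fs[i + j] = "." then
      if t ≤ (j : Int) + 1 then true else existTrouWhile fs t i (j + 1)
    else false
  else false
termination_by fs.length - (i + j)
decreasing_by omega

-- outer 'for i in range(maxIndice)' of A; the -2 branch is Python's IndexError (excluded by Pre_)
def existTrouFor (fs : List String) (t m : Int) (i : Nat) : Int :=
  if hi : (i : Int) < m then
    if h : i < fs.length then
      if fs[i] = "." then
        if existTrouWhile fs t i 0 then (i : Int) else existTrouFor fs t m (i + 1)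
      else existTrouFor fs t m (i + 1)
    else -2
  else -1
termination_by (m - i).toNat
decreasing_by all_goals omega

def existTrou (filesystem : List String) (tailleMinTrou : Int) (maxIndice : Int) : Int :=
  existTrouFor filesystem tailleMinTrou maxIndice 0

-- ===== PORT B =====
-- the single 'for i, s in enumerate(filesystem)' loop of B, carrying the current run start
def existTrouAltLoop (need m : Int) : List String → Nat → Option Nat → Int
  | [], _, _ => -1
  | s :: rest, i, start =>
    if s = "." then
      let st := start.getD i
      if (st : Int) < m ∧ (i : Int) - (st : Int) + 1 ≥ need then (st : Int)
      else existTrouAltLoop need m rest (i + 1) (some st)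
    else existTrouAltLoop need m rest (i + 1) none

def existTrou_alt (filesystem : List String) (tailleMinTrou : Int) (maxIndice : Int) : Int :=
  existTrouAltLoop (max tailleMinTrou 1) maxIndice filesystem 0 none

-- ===== PRECONDITION & SPEC =====
-- Pre_ excludes maxIndice > len(filesystem): there A raises IndexError unless a qualifying dot run happens to be found first.
def Pre_existTrou (filesystem : List String) (tailleMinTrou : Int) (maxIndice : Int) : Prop :=
  maxIndice ≤ (filesystem.length : Int)
instance (filesystem : List String) (tailleMinTrou : Int) (maxIndice : Int) : Decidable (Pre_existTrou filesystem tailleMinTrou maxIndice) := by unfold Pre_existTrou; infer_instance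

def pvWitness_existTrou : List String × Int × Int := ([".", "a"], 1, 2)

def Spec_existTrou (filesystem : List String) (tailleMinTrou : Int) (maxIndice : Int) (out : Int) : Prop := out = existTrou_alt filesystem tailleMinTrou maxIndice
instance (filesystem : List String) (tailleMinTrou : Int) (maxIndice : Int) (out : Int) : Decidable (Spec_existTrou filesystem tailleMinTrou maxIndice out) := by unfold Spec_existTrou; infer_instance

-- ===== CLAIM (what is proved, stated in full; the proofs are below) =====
def Claim_equal_existTrou : Prop := ∀ (filesystem : List String) (tailleMinTrou : Int) (maxIndice : Int), Dom_existTrou filesystem tailleMinTrou maxIndice → Pre_existTrou filesystem tailleMinTrou maxIndice → Spec_existTrou filesystem tailleMinTrou maxIndice (existTrou filesystem tailleMinTrou maxIndice)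

-- ===== LEMMAS AND PROOFS =====

-- length of the dot run starting at index i
def runlen (fs : List String) (i : Nat) : Nat :=
  if h : i < fs.length then
    (if fs[i] = "." then runlen fs (i + 1) + 1 else 0)
  else 0
termination_by fs.length - i
decreasing_by omega

lemma runlen_eq_zero (fs : List String) (i : Nat) (h : ¬ (i < fs.length ∧ fs[i]? = some ".")) :
    runlen fs i = 0 := by
  rw [runlen]
  split
  · rename_i hlt
    have hget : fs[i]? = some fs[i] := List.getElem?_eq_getElem hlt
    split
    · rename_i hd; exact absurd ⟨hlt, by rw [hget, hd]⟩ h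
    · rfl
  · rfl

lemma runlen_succ (fs : List String) (i : Nat) (h1 : i < fs.length) (h2 : fs[i] = ".") :
    runlen fs i = runlen fs (i + 1) + 1 := by
  rw [runlen, dif_pos h1, if_pos h2]

-- reference scan: first index j ≥ i that is a dot, has j < m, and heads a run of length ≥ need
def G (fs : List String) (need m : Int) (i : Nat) : Int :=
  if h : i < fs.length then
    (if fs[i] = "." ∧ (i : Int) < m ∧ need ≤ (runlen fs i : Int) then (i : Int)
     else G fs need m (i + 1))
  else -1
termination_by fs.length - i
decreasing_by omega

lemma existTrouWhile_eq (fs : List String) (t : Int) (i j : Nat) :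
    existTrouWhile fs t i j
      = decide (1 ≤ runlen fs (i + j) ∧ t ≤ (j : Int) + (runlen fs (i + j) : Int)) := by
  rw [existTrouWhile]
  split
  · rename_i hlt
    split
    · rename_i hd
      have hr := runlen_succ fs (i + j) hlt hd
      split
      · rename_i ht
        symm; rw [decide_eq_true_iff]
        refine ⟨by omega, ?_⟩
        rw [hr]; push_cast; omega
      · rename_i ht
        rw [existTrouWhile_eq fs t i (j + 1)]
        have harr : i + (j + 1) = i + j + 1 := by omega
        rw [harr, hr, decide_eq_decide]
        push_cast
        constructor
        · rintro ⟨h1, h2⟩; exact ⟨trivial, by omega⟩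
        · rintro ⟨h1, h2⟩; exact ⟨by omega, by omega⟩
    · rename_i hd
      have hz : runlen fs (i + j) = 0 := by
        apply runlen_eq_zero
        rintro ⟨h1, h2⟩
        rw [List.getElem?_eq_getElem h1] at h2
        exact hd (Option.some.injEq _ _ ▸ h2)
      rw [hz]; simp
  · rename_i hlt
    have hz : runlen fs (i + j) = 0 := by
      apply runlen_eq_zero; rintro ⟨h1, _⟩; exact hlt h1
    rw [hz]; simp
termination_by fs.length - (i + j)
decreasing_by omega

lemma G_of_ge (fs : List String) (need m : Int) (i : Nat) (h : m ≤ (i : Int)) :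
    G fs need m i = -1 := by
  rw [G]
  split
  · rename_i hlt
    have hc : ¬ (fs[i] = "." ∧ (i : Int) < m ∧ need ≤ (runlen fs i : Int)) := by
      rintro ⟨_, ha, _⟩; omega
    rw [if_neg hc]
    exact G_of_ge fs need m (i + 1) (by push_cast; omega)
  · rfl
termination_by fs.length - i
decreasing_by omega

lemma existTrouFor_eq_G (fs : List String) (t m : Int) (i : Nat)
    (hm : m ≤ (fs.length : Int)) :
    existTrouFor fs t m i = G fs (max t 1) m i := by
  rw [existTrouFor]
  split
  · rename_i hi
    have hlen : i < fs.length := by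
      have hx : (i : Int) < (fs.length : Int) := lt_of_lt_of_le hi hm
      exact_mod_cast hx
    rw [dif_pos hlen]
    by_cases hd : fs[i] = "."
    · rw [if_pos hd, existTrouWhile_eq]
      have hr := runlen_succ fs i hlen hd
      have h0 : i + 0 = i := rfl
      rw [h0]
      by_cases hw : t ≤ (runlen fs i : Int)
      · have hdec : decide (1 ≤ runlen fs i ∧ t ≤ ((0 : Nat) : Int) + (runlen fs i : Int)) = true := by
          rw [decide_eq_true_iff]
          exact ⟨by omega, by push_cast; omega⟩
        rw [hdec, if_pos rfl]
        have hc : fs[i] = "." ∧ (i : Int) < m ∧ max t 1 ≤ (runlen fs i : Int) := by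
          refine ⟨hd, hi, ?_⟩
          have h1 : (1 : Int) ≤ (runlen fs i : Int) := by omega
          omega
        rw [G, dif_pos hlen, if_pos hc]
      · have hdec : decide (1 ≤ runlen fs i ∧ t ≤ ((0 : Nat) : Int) + (runlen fs i : Int)) = false := by
          rw [decide_eq_false_iff_not]
          rintro ⟨_, h2⟩; push_cast at h2; omega
        rw [hdec]
        simp only [Bool.false_eq_true, if_false]
        rw [existTrouFor_eq_G fs t m (i + 1) hm]
        have hc : ¬ (fs[i] = "." ∧ (i : Int) < m ∧ max t 1 ≤ (runlen fs i : Int)) := by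
          rintro ⟨_, _, h3⟩
          exact hw (le_trans (le_max_left _ _) h3)
        conv_rhs => rw [G, dif_pos hlen, if_neg hc]
    · rw [if_neg hd]
      rw [existTrouFor_eq_G fs t m (i + 1) hm]
      have hc : ¬ (fs[i] = "." ∧ (i : Int) < m ∧ max t 1 ≤ (runlen fs i : Int)) := by
        rintro ⟨h1, _, _⟩; exact hd h1
      conv_rhs => rw [G, dif_pos hlen, if_neg hc]
  · rename_i hi
    rw [G_of_ge fs (max t 1) m i (by omega)]
termination_by (m - i).toNat
decreasing_by all_goals omega

-- a run that fails (start ≥ m or too short) contributes nothing: G skips to its end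
lemma G_skip (fs : List String) (need m : Int) (hneed : 1 ≤ need) (i : Nat)
    (h1 : i < fs.length) (h2 : fs[i] = ".") :
    G fs need m i
      = if (i : Int) < m ∧ need ≤ (runlen fs i : Int) then (i : Int)
        else G fs need m (i + runlen fs i) := by
  by_cases hc : (i : Int) < m ∧ need ≤ (runlen fs i : Int)
  · rw [if_pos hc, G, dif_pos h1, if_pos ⟨h2, hc.1, hc.2⟩]
  · rw [if_neg hc, G, dif_pos h1,
      if_neg (by rintro ⟨_, ha, hb⟩; exact hc ⟨ha, hb⟩)]
    have hr := runlen_succ fs i h1 h2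
    by_cases hz : i + 1 < fs.length ∧ fs[i + 1]? = some "."
    · obtain ⟨hl1, hg1⟩ := hz
      have hd1 : fs[i + 1] = "." := by
        rw [List.getElem?_eq_getElem hl1] at hg1
        exact Option.some.injEq _ _ ▸ hg1
      rw [G_skip fs need m hneed (i + 1) hl1 hd1]
      have hc1 : ¬ (((i + 1 : Nat) : Int) < m ∧ need ≤ (runlen fs (i + 1) : Int)) := by
        rintro ⟨ha, hb⟩
        apply hc
        constructor
        · push_cast at ha; omega
        · rw [hr]; push_cast at hb ⊢; omega
      rw [if_neg hc1]
      congr 1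
      omega
    · have hz0 : runlen fs (i + 1) = 0 := runlen_eq_zero fs (i + 1) hz
      rw [hr, hz0]
termination_by fs.length - i
decreasing_by omega

-- the single pass of B computes G: with no open run it is G at i; with an open failed run
-- started at st it returns st iff the run still reaches the needed length, else G at the run's end
lemma altLoop_eq_G (fs : List String) (need m : Int) (hneed : 1 ≤ need) :
    ∀ (rest : List String) (i : Nat), rest = fs.drop i →
      (existTrouAltLoop need m rest i none = G fs need m i) ∧
      (∀ st : Nat, ¬ ((st : Int) < m ∧ (i : Int) - (st : Int) ≥ need) →
        existTrouAltLoop need m rest i (some st)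
          = if (st : Int) < m ∧ need ≤ ((i : Int) - (st : Int) + (runlen fs i : Int)) then (st : Int)
            else G fs need m (i + runlen fs i)) := by
  intro rest
  induction rest with
  | nil =>
    intro i hdrop
    have hlen : fs.length ≤ i := by
      by_contra hlt
      push_neg at hlt
      have := List.drop_eq_getElem_cons hlt
      rw [this] at hdrop
      exact List.cons_ne_nil _ _ hdrop.symm
    have hG : G fs need m i = -1 := by unfold G; simp [Nat.not_lt.mpr hlen]
    have hr0 : runlen fs i = 0 := runlen_eq_zero fs i (by intro ⟨h1, _⟩; omega)
    refine ⟨by simp [existTrouAltLoop, hG], ?_⟩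
    intro st hfail
    have : ¬ ((st : Int) < m ∧ need ≤ (i : Int) - (st : Int) + (runlen fs i : Int)) := by
      rw [hr0]; push_cast; intro ⟨ha, hb⟩; exact hfail ⟨ha, by omega⟩
    rw [if_neg this, hr0]
    simp [existTrouAltLoop, hG]
  | cons s rest' ih =>
    intro i hdrop
    have hlt : i < fs.length := by
      by_contra hge
      push_neg at hge
      rw [List.drop_eq_nil_of_le hge] at hdrop
      exact List.cons_ne_nil _ _ hdrop
    have hcons : fs.drop i = fs[i] :: fs.drop (i + 1) := List.drop_eq_getElem_cons hlt
    rw [hcons] at hdrop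
    have hs : s = fs[i] := (List.cons.injEq _ _ _ _ ▸ hdrop).1
    have hrest : rest' = fs.drop (i + 1) := (List.cons.injEq _ _ _ _ ▸ hdrop).2
    obtain ⟨ihn, ihs⟩ := ih (i + 1) hrest
    by_cases hd : fs[i] = "."
    · have hr : runlen fs i = runlen fs (i + 1) + 1 := runlen_succ fs i hlt hd
      constructor
      · -- start = none, fs[i] = "."
        show existTrouAltLoop need m (s :: rest') i none = G fs need m i
        rw [G_skip fs need m hneed i hlt hd]
        simp only [existTrouAltLoop, hs, hd, if_true, Option.getD_none]
        by_cases hc : (i : Int) < m ∧ (i : Int) - (i : Int) + 1 ≥ need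
        · rw [if_pos hc]
          have : (i : Int) < m ∧ need ≤ (runlen fs i : Int) := by
            refine ⟨hc.1, ?_⟩
            have := hc.2
            rw [hr]; push_cast; omega
          rw [if_pos this]
        · rw [if_neg hc]
          rw [ihs i (by push_cast; intro ⟨ha, hb⟩; exact hc ⟨ha, by omega⟩)]
          have e1 : ((i + 1 : Nat) : Int) - (i : Int) + (runlen fs (i + 1) : Int) = (runlen fs i : Int) := by
            rw [hr]; push_cast; ring
          have e2 : i + 1 + runlen fs (i + 1) = i + runlen fs i := by omega
          rw [e1, e2]
      · -- start = some st, fs[i] = "."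
        intro st hfail
        show existTrouAltLoop need m (s :: rest') i (some st)
            = if (st : Int) < m ∧ need ≤ ((i : Int) - (st : Int) + (runlen fs i : Int)) then (st : Int)
              else G fs need m (i + runlen fs i)
        simp only [existTrouAltLoop, hs, hd, if_true, Option.getD_some]
        by_cases hc : (st : Int) < m ∧ (i : Int) - (st : Int) + 1 ≥ need
        · rw [if_pos hc]
          have : (st : Int) < m ∧ need ≤ (i : Int) - (st : Int) + (runlen fs i : Int) := by
            refine ⟨hc.1, ?_⟩
            have h1 : (1 : Int) ≤ (runlen fs i : Int) := by
              rw [hr]; push_cast; omega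
            have := hc.2; omega
          rw [if_pos this]
        · rw [if_neg hc]
          rw [ihs st (by push_cast; intro ⟨ha, hb⟩; exact hc ⟨ha, by omega⟩)]
          have e1 : ((i + 1 : Nat) : Int) - (st : Int) + (runlen fs (i + 1) : Int)
              = (i : Int) - (st : Int) + (runlen fs i : Int) := by
            rw [hr]; push_cast; ring
          have e2 : i + 1 + runlen fs (i + 1) = i + runlen fs i := by omega
          rw [e1, e2]
    · -- fs[i] ≠ "."
      have hr0 : runlen fs i = 0 := by
        apply runlen_eq_zero
        intro ⟨h1, h2⟩
        rw [List.getElem?_eq_getElem h1] at h2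
        exact hd (Option.some.injEq _ _ ▸ h2)
      have hGstep : G fs need m i = G fs need m (i + 1) := by
        conv_lhs => rw [G]
        rw [dif_pos hlt, if_neg (fun hh => hd hh.1)]
      constructor
      · show existTrouAltLoop need m (s :: rest') i none = G fs need m i
        simp only [existTrouAltLoop]
        rw [if_neg (fun h => hd (hs ▸ h)), ihn, hGstep]
      · intro st hfail
        show existTrouAltLoop need m (s :: rest') i (some st)
            = if (st : Int) < m ∧ need ≤ ((i : Int) - (st : Int) + (runlen fs i : Int)) then (st : Int)
              else G fs need m (i + runlen fs i)
        have : ¬ ((st : Int) < m ∧ need ≤ (i : Int) - (st : Int) + (runlen fs i : Int)) := by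
          rw [hr0]; push_cast; intro ⟨ha, hb⟩; exact hfail ⟨ha, by omega⟩
        rw [if_neg this, hr0]
        simp only [existTrouAltLoop]
        rw [if_neg (fun h => hd (hs ▸ h)), ihn]
        exact hGstep.symm

-- ===== VERDICT (by name: the statement is the Claim_ definition above) =====
theorem existTrou_spec : Claim_equal_existTrou := by
  intro fs t m _ hpre
  show existTrou fs t m = existTrou_alt fs t m
  unfold existTrou existTrou_alt
  rw [existTrouFor_eq_G fs t m 0 hpre]
  exact ((altLoop_eq_G fs (max t 1) m (le_max_right _ _) fs 0 rfl).1).symm
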